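-- pv_equiv track=rewrite | github.com/zycliao/senc-codes | utils_self_inter/mesh.py | find_closed_four_points
-- ===== SOURCE A (Python) =====
-- def find_closed_four_points(vertex_edge_dict):
--     rank = [0, 0, 0, 0]
--     rank_v = [-1, -1, -1, -1]
--     for v in vertex_edge_dict:
--         num_neighbors = len(vertex_edge_dict[v])
--         if num_neighbors > rank[0]:
--             rank[3] = rank[2]
--             rank[2] = rank[1]
--             rank[1] = rank[0]
--             rank[0] = num_neighbors
--
--             rank_v[3] = rank_v[2]
--             rank_v[2] = rank_v[1]
--             rank_v[1] = rank_v[0]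
--             rank_v[0] = v
--         elif num_neighbors > rank[1]:
--             rank[3] = rank[2]
--             rank[2] = rank[1]
--             rank[1] = num_neighbors
--
--             rank_v[3] = rank_v[2]
--             rank_v[2] = rank_v[1]
--             rank_v[1] = v
--         elif num_neighbors > rank[2]:
--             rank[3] = rank[2]
--             rank[2] = num_neighbors
--
--             rank_v[3] = rank_v[2]
--             rank_v[2] = v
--         elif num_neighbors > rank[3]:
--             rank[3] = num_neighbors
--
--             rank_v[3] = v
--     return rank, rank_v
-- ===== SOURCE B (Python) =====
-- def find_closed_four_points(vertex_edge_dict):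
--     pairs = [(len(vertex_edge_dict[v]), v) for v in vertex_edge_dict]
--     top = sorted([p for p in pairs if p[0] > 0], key=lambda p: -p[0])[:4]
--     rank = [c for c, _ in top] + [0] * (4 - len(top))
--     rank_v = [v for _, v in top] + [-1] * (4 - len(top))
--     return rank, rank_v
-- ===== Notes on version B (the rewrite author's own statement) =====
-- stated objective: idiomatic
-- what changed: Replaces A's hand-unrolled four-register shift-cascade insertion with the idiomatic pipeline: build (count, vertex) pairs, filter out zero-degree vertices, stably sort by count descending, slice the top 4 and pad with 0 / -1.
import Mathlib
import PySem

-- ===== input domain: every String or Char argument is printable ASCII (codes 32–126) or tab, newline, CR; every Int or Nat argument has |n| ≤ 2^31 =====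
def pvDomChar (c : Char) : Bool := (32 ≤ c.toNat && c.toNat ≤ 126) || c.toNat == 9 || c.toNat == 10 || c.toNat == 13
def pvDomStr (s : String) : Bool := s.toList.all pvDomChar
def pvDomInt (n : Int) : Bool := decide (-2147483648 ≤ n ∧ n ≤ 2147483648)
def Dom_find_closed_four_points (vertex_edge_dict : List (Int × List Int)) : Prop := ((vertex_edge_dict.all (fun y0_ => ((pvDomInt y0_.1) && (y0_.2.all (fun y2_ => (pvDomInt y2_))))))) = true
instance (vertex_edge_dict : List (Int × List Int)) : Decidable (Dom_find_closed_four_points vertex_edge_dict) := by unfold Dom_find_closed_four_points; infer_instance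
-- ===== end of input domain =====

-- B replaces A's hand-unrolled four-register insertion cascade by the idiomatic
-- "sort pairs by count descending, slice the top 4, pad" pipeline (same values; not faster).


-- ===== PORT A =====
-- 'for v in vertex_edge_dict: num_neighbors = len(vertex_edge_dict[v])' iterates the dict's
-- (key, value) pairs in insertion order; the two length-4 Python lists are carried as 4-tuples.
def find_closed_four_points (vertex_edge_dict : List (Int × List Int)) : List Int × List Int :=
  let st := vertex_edge_dict.foldl
    (fun (st : (Int × Int × Int × Int) × (Int × Int × Int × Int)) kv =>
      let num_neighbors : Int := (kv.2.length : Int)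
      match st with
      | ((r0, r1, r2, r3), (w0, w1, w2, w3)) =>
        if num_neighbors > r0 then ((num_neighbors, r0, r1, r2), (kv.1, w0, w1, w2))
        else if num_neighbors > r1 then ((r0, num_neighbors, r1, r2), (w0, kv.1, w1, w2))
        else if num_neighbors > r2 then ((r0, r1, num_neighbors, r2), (w0, w1, kv.1, w2))
        else if num_neighbors > r3 then ((r0, r1, r2, num_neighbors), (w0, w1, w2, kv.1))
        else ((r0, r1, r2, r3), (w0, w1, w2, w3)))
    ((0, 0, 0, 0), (-1, -1, -1, -1))
  match st with
  | ((r0, r1, r2, r3), (w0, w1, w2, w3)) => ([r0, r1, r2, r3], [w0, w1, w2, w3])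

-- ===== PORT B =====
def find_closed_four_points_alt (vertex_edge_dict : List (Int × List Int)) : List Int × List Int :=
  let pairs : List (Int × Int) := vertex_edge_dict.map (fun kv => ((kv.2.length : Int), kv.1))
  let top := PySem.List.slice
    (PySem.List.sorted (pairs.filter (fun p => p.1 > 0)) (fun p => -p.1)) none (some 4)
  (top.map Prod.fst ++ List.replicate (4 - top.length) 0,
   top.map Prod.snd ++ List.replicate (4 - top.length) (-1))

-- ===== PRECONDITION & SPEC =====
def Spec_find_closed_four_points (vertex_edge_dict : List (Int × List Int)) (out : List Int × List Int) : Prop := out = find_closed_four_points_alt vertex_edge_dict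
instance (vertex_edge_dict : List (Int × List Int)) (out : List Int × List Int) : Decidable (Spec_find_closed_four_points vertex_edge_dict out) := by unfold Spec_find_closed_four_points; infer_instance

-- ===== CLAIM (what is proved, stated in full; the proofs are below) =====
def Claim_equal_find_closed_four_points : Prop := ∀ (vertex_edge_dict : List (Int × List Int)), Dom_find_closed_four_points vertex_edge_dict → Spec_find_closed_four_points vertex_edge_dict (find_closed_four_points vertex_edge_dict)

-- ===== LEMMAS AND PROOFS =====

-- A's loop body on a prepared (count, vertex) pair.
def pvStepA (st : (Int × Int × Int × Int) × (Int × Int × Int × Int)) (p : Int × Int) :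
    (Int × Int × Int × Int) × (Int × Int × Int × Int) :=
  match st with
  | ((r0, r1, r2, r3), (w0, w1, w2, w3)) =>
    if p.1 > r0 then ((p.1, r0, r1, r2), (p.2, w0, w1, w2))
    else if p.1 > r1 then ((r0, p.1, r1, r2), (w0, p.2, w1, w2))
    else if p.1 > r2 then ((r0, r1, p.1, r2), (w0, w1, p.2, w2))
    else if p.1 > r3 then ((r0, r1, r2, p.1), (w0, w1, w2, p.2))
    else ((r0, r1, r2, r3), (w0, w1, w2, w3))

-- readback of A's final registers into the two returned lists
def pvUnpack (st : (Int × Int × Int × Int) × (Int × Int × Int × Int)) : List Int × List Int :=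
  ([st.1.1, st.1.2.1, st.1.2.2.1, st.1.2.2.2], [st.2.1, st.2.2.1, st.2.2.2.1, st.2.2.2.2])

-- the ordering predicate of B's stable sort with key (-count), and B's filter predicate
def pvBf (a b : Int × Int) : Bool := decide ((-a.1 : Int) < -b.1)
def pvPos (p : Int × Int) : Bool := decide (p.1 > 0)

-- one B-side step: keep only the top 4 of the running sorted list
def pvIns (t : List (Int × Int)) (p : Int × Int) : List (Int × Int) :=
  (if pvPos p then PySem.List.insertBy pvBf p t else t).take 4

-- encode a sorted top-<=4 list as A's register tuple
def pvEnc (t : List (Int × Int)) : (Int × Int × Int × Int) × (Int × Int × Int × Int) :=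
  (((t.map Prod.fst).getD 0 0, (t.map Prod.fst).getD 1 0,
    (t.map Prod.fst).getD 2 0, (t.map Prod.fst).getD 3 0),
   ((t.map Prod.snd).getD 0 (-1), (t.map Prod.snd).getD 1 (-1),
    (t.map Prod.snd).getD 2 (-1), (t.map Prod.snd).getD 3 (-1)))

def pvInv (t : List (Int × Int)) : Prop :=
  t.length ≤ 4 ∧ t.Pairwise (fun a b => b.1 ≤ a.1) ∧ ∀ p ∈ t, 0 < p.1

lemma pv_take_insertBy {α : Type} (before : α → α → Bool) (x : α) :
    ∀ (t : List α) (n : Nat),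
      (PySem.List.insertBy before x t).take n = (PySem.List.insertBy before x (t.take n)).take n := by
  intro t
  induction t with
  | nil => intro n; simp
  | cons y ys ih =>
    intro n
    cases n with
    | zero => simp
    | succ m =>
      by_cases h : before x y
      · cases m with
        | zero => simp [PySem.List.insertBy, h]
        | succ k =>
          simp [PySem.List.insertBy, h, List.take_take]
      · simp [PySem.List.insertBy, h, ih m]

lemma pv_take4_foldl (q : Int × Int → Bool) :
    ∀ (ps : List (Int × Int)) (t : List (Int × Int)),
      (List.foldl (fun acc p => if q p then PySem.List.insertBy pvBf p acc else acc) t ps).take 4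
        = List.foldl (fun acc p => (if q p then PySem.List.insertBy pvBf p acc else acc).take 4)
            (t.take 4) ps := by
  intro ps
  induction ps with
  | nil => intro t; rfl
  | cons p ps ih =>
    intro t
    simp only [List.foldl_cons]
    rw [ih]
    congr 1
    by_cases h : q p
    · rw [if_pos h, if_pos h]
      exact pv_take_insertBy pvBf p t 4
    · simp [h, List.take_take]

lemma pv_pairwise_insertBy (x : Int × Int) :
    ∀ t : List (Int × Int), t.Pairwise (fun a b => b.1 ≤ a.1) →
      (PySem.List.insertBy pvBf x t).Pairwise (fun a b => b.1 ≤ a.1) := by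
  intro t
  induction t with
  | nil => intro _; simp [PySem.List.insertBy]
  | cons y ys ih =>
    intro hp
    rw [List.pairwise_cons] at hp
    by_cases h : pvBf x y
    · have hyx : y.1 < x.1 := by simpa [pvBf] using h
      simp only [PySem.List.insertBy, h, if_pos]
      refine List.Pairwise.cons ?_ (List.Pairwise.cons hp.1 hp.2)
      intro z hz
      rcases List.mem_cons.1 hz with rfl | hz
      · exact le_of_lt hyx
      · exact le_trans (hp.1 z hz) (le_of_lt hyx)
    · have hxy : x.1 ≤ y.1 := by simpa [pvBf] using h
      simp only [PySem.List.insertBy, h]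
      refine List.Pairwise.cons ?_ (ih hp.2)
      intro z hz
      rcases (PySem.List.mem_insertBy pvBf x z ys).1 hz with rfl | hz
      · exact hxy
      · exact hp.1 z hz

lemma pv_inv_ins (t : List (Int × Int)) (p : Int × Int) (h : pvInv t) : pvInv (pvIns t p) := by
  obtain ⟨_, hpw, hpos⟩ := h
  refine ⟨?_, ?_, ?_⟩
  · simp only [pvIns]
    exact List.length_take_le 4 _
  · refine List.Pairwise.sublist (List.take_sublist _ _) ?_
    by_cases hq : pvPos p
    · simpa [pvIns, hq] using pv_pairwise_insertBy p t hpw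
    · simpa [pvIns, hq] using hpw
  · intro z hz
    have hz' := List.mem_of_mem_take hz
    by_cases hq : pvPos p
    · rw [if_pos hq] at hz'
      rcases (PySem.List.mem_insertBy pvBf p z t).1 hz' with rfl | hz''
      · simpa [pvPos] using hq
      · exact hpos z hz''
    · rw [if_neg hq] at hz'
      exact hpos z hz'

set_option maxHeartbeats 1600000 in
lemma pv_step_eq (t : List (Int × Int)) (p : Int × Int) (h : pvInv t) :
    pvStepA (pvEnc t) p = pvEnc (pvIns t p) := by
  obtain ⟨hlen, hpw, hpos⟩ := h
  rcases t with _ | ⟨a, _ | ⟨b, _ | ⟨c, _ | ⟨d, _ | t⟩⟩⟩⟩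
  · simp only [pvStepA, pvEnc, pvIns, pvPos, PySem.List.insertBy]
    split_ifs <;> simp_all <;> omega
  · have ha := hpos a (by simp)
    simp only [List.pairwise_cons] at hpw
    simp only [pvStepA, pvEnc, pvIns, pvBf, pvPos, PySem.List.insertBy]
    split_ifs <;> simp_all <;> omega
  · have ha := hpos a (by simp)
    have hb := hpos b (by simp)
    simp only [List.pairwise_cons] at hpw
    have hba : b.1 ≤ a.1 := hpw.1 b (by simp)
    simp only [pvStepA, pvEnc, pvIns, pvBf, pvPos, PySem.List.insertBy]
    split_ifs <;> simp_all <;> omega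
  · have ha := hpos a (by simp)
    have hb := hpos b (by simp)
    have hc := hpos c (by simp)
    simp only [List.pairwise_cons] at hpw
    have hba : b.1 ≤ a.1 := hpw.1 b (by simp)
    have hca : c.1 ≤ a.1 := hpw.1 c (by simp)
    have hcb : c.1 ≤ b.1 := hpw.2.1 c (by simp)
    simp only [pvStepA, pvEnc, pvIns, pvBf, pvPos, PySem.List.insertBy]
    split_ifs <;> simp_all <;> omega
  · have ha := hpos a (by simp)
    have hb := hpos b (by simp)
    have hc := hpos c (by simp)
    have hd := hpos d (by simp)
    simp only [List.pairwise_cons] at hpw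
    have hba : b.1 ≤ a.1 := hpw.1 b (by simp)
    have hca : c.1 ≤ a.1 := hpw.1 c (by simp)
    have hda : d.1 ≤ a.1 := hpw.1 d (by simp)
    have hcb : c.1 ≤ b.1 := hpw.2.1 c (by simp)
    have hdb : d.1 ≤ b.1 := hpw.2.1 d (by simp)
    have hdc : d.1 ≤ c.1 := hpw.2.2.1 d (by simp)
    simp only [pvStepA, pvEnc, pvIns, pvBf, pvPos, PySem.List.insertBy]
    split_ifs <;> simp_all <;> omega
  · simp at hlen; omega

lemma pv_fold_eq :
    ∀ (ps : List (Int × Int)) (t : List (Int × Int)), pvInv t →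
      List.foldl pvStepA (pvEnc t) ps = pvEnc (List.foldl pvIns t ps) := by
  intro ps
  induction ps with
  | nil => intro t _; rfl
  | cons p ps ih =>
    intro t ht
    simp only [List.foldl_cons]
    rw [pv_step_eq t p ht, ih _ (pv_inv_ins t p ht)]

lemma pv_inv_fold (ps : List (Int × Int)) (t : List (Int × Int)) (h : pvInv t) :
    pvInv (List.foldl pvIns t ps) := by
  induction ps generalizing t with
  | nil => exact h
  | cons p ps ih => exact ih _ (pv_inv_ins t p h)

lemma pv_unpack_enc (t : List (Int × Int)) (h : t.length ≤ 4) :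
    pvUnpack (pvEnc t)
      = (t.map Prod.fst ++ List.replicate (4 - t.length) 0,
         t.map Prod.snd ++ List.replicate (4 - t.length) (-1)) := by
  rcases t with _ | ⟨a, _ | ⟨b, _ | ⟨c, _ | ⟨d, _ | t⟩⟩⟩⟩
  · rfl
  · rfl
  · rfl
  · rfl
  · rfl
  · exfalso; simp at h; omega

-- ===== VERDICT (by name: the statement is the Claim_ definition above) =====
theorem find_closed_four_points_spec : Claim_equal_find_closed_four_points := by
  intro d _
  unfold Spec_find_closed_four_points
  show find_closed_four_points d = find_closed_four_points_alt d
  have hinv0 : pvInv ([] : List (Int × Int)) := ⟨by simp, by simp, by simp⟩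
  have hslice : ∀ xs : List (Int × Int), PySem.List.slice xs none (some 4) = xs.take 4 := by
    intro xs
    simpa using PySem.List.slice_to_natCast xs (b := 4)
  have hA : find_closed_four_points d
      = pvUnpack (List.foldl pvStepA (pvEnc [])
          (d.map (fun kv => ((kv.2.length : Int), kv.1)))) := by
    rw [List.foldl_map]
    rfl
  have hTop : PySem.List.slice
        (PySem.List.sorted
          ((d.map (fun kv => ((kv.2.length : Int), kv.1))).filter (fun p => p.1 > 0))
          (fun p => -p.1)) none (some 4)
      = List.foldl pvIns [] (d.map (fun kv => ((kv.2.length : Int), kv.1))) := by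
    rw [hslice, PySem.List.sorted_eq_foldl_insertBy, List.foldl_filter]
    exact pv_take4_foldl pvPos (d.map (fun kv => ((kv.2.length : Int), kv.1))) []
  have hB : find_closed_four_points_alt d
      = (fun top : List (Int × Int) =>
          (top.map Prod.fst ++ List.replicate (4 - top.length) 0,
           top.map Prod.snd ++ List.replicate (4 - top.length) (-1)))
        (PySem.List.slice
          (PySem.List.sorted
            ((d.map (fun kv => ((kv.2.length : Int), kv.1))).filter (fun p => p.1 > 0))
            (fun p => -p.1)) none (some 4)) := rfl
  have hlen4 : (List.foldl pvIns [] (d.map (fun kv => ((kv.2.length : Int), kv.1)))).length ≤ 4 :=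
    (pv_inv_fold (d.map (fun kv => ((kv.2.length : Int), kv.1))) [] hinv0).1
  rw [hA, pv_fold_eq _ [] hinv0, pv_unpack_enc _ hlen4, hB, hTop]
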